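-- pv_equiv track=rewrite | github.com/whoiscyberslut/automation | namingconv_easier.py | generate_filenames
-- ===== SOURCE A (Python) =====
-- def generate_filenames(ip_addresses, start_sequence):
--     filenames = []
--     ip_counters = {}  # Dictionary to store the counter for each IP address
--     ip_sequence = {}  # Dictionary to store the last sequence number for each unique IP address
--
--     for ip_address in ip_addresses:
--         if ip_address not in ip_sequence:
--             ip_sequence[ip_address] = start_sequence
--             start_sequence += 4
--         else:
--             ip_sequence[ip_address] += 10000  # Increment by 10000 for subsequent files for the same IP
--
--         filename = f"{ip_address}_{ip_sequence[ip_address]:06}.txt"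
--         filenames.append(filename)
--
--     return filenames
-- ===== SOURCE B (Python) =====
-- def generate_filenames(ip_addresses, start_sequence):
--     # Two passes instead of A's single interleaved loop:
--     # pass 1 assigns each distinct IP a base (start, start+4, ...),
--     # pass 2 lays out each occurrence as base + 10000 * (#prior occurrences).
--     ips = list(ip_addresses)
--     bases = {}
--     for ip in ips:
--         if ip not in bases:
--             bases[ip] = start_sequence + 4 * len(bases)
--     counts = {}
--     filenames = []
--     for ip in ips:
--         c = counts.get(ip, 0)
--         counts[ip] = c + 1
--         filenames.append(f"{ip}_{bases[ip] + 10000 * c:06}.txt")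
--     return filenames
-- ===== Notes on version B (the rewrite author's own statement) =====
-- stated objective: alternative
-- what changed: A's single interleaved loop (one dict of running sequence numbers, mutated start) is split into a base-table pass over the distinct IPs plus a layout pass computing base + 10000*prior-occurrences from an occurrence counter.
import Mathlib
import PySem

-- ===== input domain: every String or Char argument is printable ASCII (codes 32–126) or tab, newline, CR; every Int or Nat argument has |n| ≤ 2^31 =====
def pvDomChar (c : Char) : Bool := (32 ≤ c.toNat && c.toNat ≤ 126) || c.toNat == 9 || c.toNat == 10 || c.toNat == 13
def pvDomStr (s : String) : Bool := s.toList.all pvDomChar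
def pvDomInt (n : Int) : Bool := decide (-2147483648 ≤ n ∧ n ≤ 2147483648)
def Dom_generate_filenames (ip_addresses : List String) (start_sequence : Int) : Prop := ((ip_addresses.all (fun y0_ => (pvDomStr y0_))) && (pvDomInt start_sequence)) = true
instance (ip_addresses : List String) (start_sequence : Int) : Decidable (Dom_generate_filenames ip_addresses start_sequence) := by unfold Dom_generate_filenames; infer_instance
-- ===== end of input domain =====

-- B replaces A's single interleaved loop by a base-table pass plus a layout pass (alternative decomposition, same cost).

-- f"{ip}_{v:06}.txt" (shared by both Pythons' f-strings)
def pvFmt (ip : String) (v : Int) : String :=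
  ip ++ "_" ++ PySem.Str.zfill (PySem.Int.toStr v) 6 ++ ".txt"

-- ===== PORT A =====
def pvStepA (st : List String × PySem.Dict String Int × Int) (ip : String) :
    List String × PySem.Dict String Int × Int :=
  if st.2.1.contains ip = false then
    let seqd := st.2.1.insert ip st.2.2
    (st.1 ++ [pvFmt ip (seqd.getD ip 0)], seqd, st.2.2 + 4)
  else
    let seqd := st.2.1.modify ip 0 (· + 10000)
    (st.1 ++ [pvFmt ip (seqd.getD ip 0)], seqd, st.2.2)

def generate_filenames (ip_addresses : List String) (start_sequence : Int) : List String :=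
  (ip_addresses.foldl pvStepA ([], PySem.Dict.empty, start_sequence)).1

-- ===== PORT B =====
-- pass 1: each distinct IP gets base start + 4*len(bases)
def pvBuildBases (ip_addresses : List String) (start_sequence : Int) : PySem.Dict String Int :=
  ip_addresses.foldl
    (fun d ip => if d.contains ip = false then d.insert ip (start_sequence + 4 * (d.size : Int)) else d)
    PySem.Dict.empty

def pvStepB (bases : PySem.Dict String Int) (st : List String × PySem.Dict String Int)
    (ip : String) : List String × PySem.Dict String Int :=
  let c := st.2.getD ip 0
  (st.1 ++ [pvFmt ip (bases.getD ip 0 + 10000 * c)], st.2.insert ip (c + 1))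

def generate_filenames_alt (ip_addresses : List String) (start_sequence : Int) : List String :=
  let bases := pvBuildBases ip_addresses start_sequence
  (ip_addresses.foldl (pvStepB bases) ([], PySem.Dict.empty)).1

-- ===== PRECONDITION & SPEC =====
def Spec_generate_filenames (ip_addresses : List String) (start_sequence : Int) (out : List String) : Prop := out = generate_filenames_alt ip_addresses start_sequence
instance (ip_addresses : List String) (start_sequence : Int) (out : List String) : Decidable (Spec_generate_filenames ip_addresses start_sequence out) := by unfold Spec_generate_filenames; infer_instance

-- ===== CLAIM (what is proved, stated in full; the proofs are below) =====
def Claim_equal_generate_filenames : Prop := ∀ (ip_addresses : List String) (start_sequence : Int), Dom_generate_filenames ip_addresses start_sequence → Spec_generate_filenames ip_addresses start_sequence (generate_filenames ip_addresses start_sequence)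

-- ===== LEMMAS AND PROOFS =====

-- A's loop in recursive (non-accumulator) form
def auxA : PySem.Dict String Int → Int → List String → List String
  | _, _, [] => []
  | seqd, s, ip :: rest =>
    if seqd.contains ip = false then
      pvFmt ip ((seqd.insert ip s).getD ip 0) :: auxA (seqd.insert ip s) (s + 4) rest
    else
      pvFmt ip ((seqd.modify ip 0 (· + 10000)).getD ip 0) :: auxA (seqd.modify ip 0 (· + 10000)) s rest

lemma foldA_eq (rest : List String) : ∀ (fns : List String) (seqd : PySem.Dict String Int) (s : Int),
    (rest.foldl pvStepA (fns, seqd, s)).1 = fns ++ auxA seqd s rest := by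
  induction rest with
  | nil => intro fns seqd s; simp [auxA]
  | cons ip rest ih =>
    intro fns seqd s
    by_cases h : seqd.contains ip = false
    · simp [List.foldl_cons, pvStepA, h, auxA, ih]
    · simp [List.foldl_cons, pvStepA, h, auxA, ih]

-- B's second loop in recursive form
def auxB (bases : PySem.Dict String Int) : PySem.Dict String Int → List String → List String
  | _, [] => []
  | counts, ip :: rest =>
    pvFmt ip (bases.getD ip 0 + 10000 * counts.getD ip 0)
      :: auxB bases (counts.insert ip (counts.getD ip 0 + 1)) rest

lemma foldB_eq (bases : PySem.Dict String Int) (rest : List String) :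
    ∀ (fns : List String) (counts : PySem.Dict String Int),
    (rest.foldl (pvStepB bases) (fns, counts)).1 = fns ++ auxB bases counts rest := by
  induction rest with
  | nil => intro fns counts; simp [auxB]
  | cons ip rest ih => intro fns counts; simp [List.foldl_cons, pvStepB, auxB, ih]

-- the bases of the not-yet-seen IPs of `rest`, in first-occurrence order, are s, s+4, s+8, …
def Chain (bases : PySem.Dict String Int) : List String → List String → Int → Prop
  | _, [], _ => True
  | seen, ip :: rest, s =>
    if ip ∈ seen then Chain bases seen rest s
    else bases.getD ip 0 = s ∧ Chain bases (ip :: seen) rest (s + 4)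

-- pass 1 never changes an entry once written
lemma buildB_mono (start : Int) (xs : List String) : ∀ (d : PySem.Dict String Int) (ip : String),
    d.contains ip = true →
    (xs.foldl (fun d ip => if d.contains ip = false then d.insert ip (start + 4 * (d.size : Int)) else d) d).getD ip 0
      = d.getD ip 0 := by
  induction xs with
  | nil => intro d ip _; rfl
  | cons x xs ih =>
    intro d ip hip
    by_cases hx : d.contains x = false
    · have hne : ip ≠ x := by intro h; rw [h] at hip; rw [hip] at hx; exact absurd hx (by simp)
      have hc : (d.insert x (start + 4 * (d.size : Int))).contains ip = true := by
        simp [PySem.Dict.contains_insert, hip]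
      simp only [List.foldl_cons, hx, if_true]
      rw [ih _ _ hc, PySem.Dict.getD_insert]
      simp [hne]
    · have hxx : d.contains x = true := by
        cases h : d.contains x
        · exact absurd h hx
        · rfl
      simp only [List.foldl_cons, hxx, Bool.true_eq_false, if_false]
      exact ih d ip hip

lemma buildB_chain (start : Int) (xs : List String) : ∀ (d : PySem.Dict String Int) (seen : List String),
    (∀ ip, d.contains ip = true ↔ ip ∈ seen) →
    Chain (xs.foldl (fun d ip => if d.contains ip = false then d.insert ip (start + 4 * (d.size : Int)) else d) d)
      seen xs (start + 4 * (d.size : Int)) := by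
  induction xs with
  | nil => intro d seen _; simp [Chain]
  | cons x xs ih =>
    intro d seen hseen
    by_cases hx : x ∈ seen
    · have hc : d.contains x = true := (hseen x).mpr hx
      simp only [List.foldl_cons, hc, Chain, hx, if_true]
      exact ih d seen hseen
    · have hc : d.contains x = false := by
        cases h : d.contains x
        · rfl
        · exact absurd ((hseen x).mp h) hx
      simp only [List.foldl_cons, hc, reduceIte, Chain, hx, if_false]
      set d' := d.insert x (start + 4 * (d.size : Int)) with hd'
      have hc' : d'.contains x = true := by simp [hd']
      constructor
      · rw [buildB_mono start xs d' x hc', hd', PySem.Dict.getD_insert_self]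
      · have hsize : (d'.size : Int) = (d.size : Int) + 1 := by
          have := PySem.Dict.size_insert d x (start + 4 * (d.size : Int))
          rw [hd', this, hc]
          push_cast; ring
        have hseen' : ∀ ip, d'.contains ip = true ↔ ip ∈ x :: seen := by
          intro ip
          simp only [hd', PySem.Dict.contains_insert, Bool.or_eq_true, beq_iff_eq,
            List.mem_cons, hseen ip]
        have := ih d' (x :: seen) hseen'
        rw [hsize] at this
        have harith : start + 4 * ((d.size : Int) + 1) = start + 4 * (d.size : Int) + 4 := by ring
        rwa [harith] at this

-- main invariant lemma: A's loop and B's layout loop produce the same list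
lemma main_inv (bases : PySem.Dict String Int) (rest : List String) :
    ∀ (seen : List String) (seqd counts : PySem.Dict String Int) (s : Int),
    (∀ ip, seqd.contains ip = true ↔ ip ∈ seen) →
    (∀ ip, ip ∈ rest → seqd.contains ip = true →
        1 ≤ counts.getD ip 0 ∧ seqd.getD ip 0 = bases.getD ip 0 + 10000 * (counts.getD ip 0 - 1)) →
    (∀ ip, ip ∈ rest → seqd.contains ip = false → counts.getD ip 0 = 0) →
    Chain bases seen rest s →
    auxA seqd s rest = auxB bases counts rest := by
  induction rest with
  | nil => intro _ _ _ _ _ _ _ _; simp [auxA, auxB]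
  | cons ip rest ih =>
    intro seen seqd counts s hseen h1 h2 hchain
    by_cases hc : seqd.contains ip = false
    · -- first occurrence of ip
      have hnotseen : ip ∉ seen := by
        intro h
        have := (hseen ip).mpr h
        rw [this] at hc; exact absurd hc (by simp)
      have hcnt : counts.getD ip 0 = 0 := h2 ip (by simp) hc
      simp only [Chain, hnotseen, if_false] at hchain
      obtain ⟨hbase, hchain'⟩ := hchain
      simp only [auxA, hc, reduceIte, auxB]
      have hval : (seqd.insert ip s).getD ip 0 = bases.getD ip 0 + 10000 * counts.getD ip 0 := by
        rw [PySem.Dict.getD_insert_self, hcnt, hbase]; ring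
      rw [hval]
      congr 1
      apply ih (ip :: seen) _ _ (s + 4)
      · intro ip'
        simp only [PySem.Dict.contains_insert, Bool.or_eq_true, beq_iff_eq,
          List.mem_cons, hseen ip']
      · intro ip' hmem hc'
        rw [PySem.Dict.getD_insert, PySem.Dict.getD_insert]
        by_cases he : ip' = ip
        · subst he
          simp [hcnt, hbase]
        · simp only [if_neg he]
          apply h1 ip' (by simp [hmem])
          rw [PySem.Dict.contains_insert] at hc'
          simpa [he] using hc'
      · intro ip' hmem hc'
        have he : ip' ≠ ip := by
          intro h; subst h
          rw [PySem.Dict.contains_insert] at hc'; simp at hc'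
        rw [PySem.Dict.getD_insert]
        simp only [if_neg he]
        apply h2 ip' (by simp [hmem])
        rw [PySem.Dict.contains_insert] at hc'
        simpa [he] using hc'
      · exact hchain'
    · -- repeated occurrence of ip
      have hct : seqd.contains ip = true := by
        cases h : seqd.contains ip
        · exact absurd h hc
        · rfl
      have hin : ip ∈ seen := (hseen ip).mp hct
      obtain ⟨hge1, hval⟩ := h1 ip (by simp) hct
      simp only [Chain, hin, if_true] at hchain
      simp only [auxA, hct, Bool.true_eq_false, if_false, auxB]
      have hvm : (seqd.modify ip 0 (· + 10000)).getD ip 0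
          = bases.getD ip 0 + 10000 * counts.getD ip 0 := by
        rw [PySem.Dict.getD_modify_self, hval]; ring
      rw [hvm]
      congr 1
      apply ih seen _ _ s
      · intro ip'
        rw [PySem.Dict.contains_modify]
        by_cases he : ip' = ip
        · subst he; simp [hct, hin]
        · simp [he, hseen ip']
      · intro ip' hmem hc'
        rw [PySem.Dict.contains_modify] at hc'
        rw [PySem.Dict.getD_modify, PySem.Dict.getD_insert]
        by_cases he : ip' = ip
        · subst he
          constructor <;> split_ifs with h
          · omega
          · exact absurd rfl h
          · rw [hval]; ring
          · exact absurd rfl h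
        · simp only [if_neg he]
          apply h1 ip' (by simp [hmem])
          simpa [he] using hc'
      · intro ip' hmem hc'
        rw [PySem.Dict.contains_modify] at hc'
        have he : ip' ≠ ip := by
          intro h; subst h; simp at hc'
        rw [PySem.Dict.getD_insert]
        simp only [if_neg he]
        apply h2 ip' (by simp [hmem])
        simpa [he] using hc'
      · exact hchain

-- ===== VERDICT (by name: the statement is the Claim_ definition above) =====
theorem generate_filenames_spec : Claim_equal_generate_filenames := by
  intro ips start _dom
  unfold Spec_generate_filenames generate_filenames generate_filenames_alt
  rw [foldA_eq, foldB_eq, List.nil_append, List.nil_append]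
  apply main_inv (pvBuildBases ips start) ips []
  · intro ip; simp [PySem.Dict.contains_empty]
  · intro ip _ hc; rw [PySem.Dict.contains_empty] at hc; exact absurd hc (by simp)
  · intro ip _ _; exact PySem.Dict.getD_empty ip 0
  · have := buildB_chain start ips PySem.Dict.empty [] (by intro ip; simp [PySem.Dict.contains_empty])
    simpa [pvBuildBases, PySem.Dict.size_empty] using this
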